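-- pv_equiv track=rewrite | github.com/syedareehaquasar/python | XXXX.py | div_Subsets
-- ===== SOURCE A (Python) =====
-- from itertools import chain, combinations
--
-- def div_Subsets(a, x):
--     ans = 0
--     for e in chain.from_iterable(combinations(a, r) for r in range(len(a)+1)):
--         if sum(e) % x != 0:
--             if len(e) > ans:
--                 ans = len(e)
--     if ans == 0:
--         return -1
--     return ans
-- ===== SOURCE B (Python) =====
-- def div_Subsets(a, x):
--     if sum(a) % x != 0:
--         return len(a)
--     if any(e % x != 0 for e in a):
--         return len(a) - 1
--     return -1
-- ===== Notes on version B (the rewrite author's own statement) =====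
-- stated objective: faster
-- what changed: Replaced the enumeration of all 2^n subsets with an O(n) argument: the answer is n if the total sum is indivisible by x, n-1 if some single element is indivisible, else -1.
import Mathlib
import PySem

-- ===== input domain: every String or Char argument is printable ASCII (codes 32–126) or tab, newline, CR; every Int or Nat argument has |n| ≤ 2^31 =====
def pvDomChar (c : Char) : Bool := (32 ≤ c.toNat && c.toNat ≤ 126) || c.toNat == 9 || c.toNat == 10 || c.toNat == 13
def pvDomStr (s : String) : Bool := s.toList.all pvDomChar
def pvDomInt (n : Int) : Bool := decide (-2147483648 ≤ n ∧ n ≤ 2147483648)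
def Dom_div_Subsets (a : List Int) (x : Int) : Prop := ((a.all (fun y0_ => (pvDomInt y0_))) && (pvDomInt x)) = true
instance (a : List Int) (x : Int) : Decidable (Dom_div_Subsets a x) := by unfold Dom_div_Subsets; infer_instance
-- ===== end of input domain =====

-- B replaces A's enumeration of all 2^n subsets by an O(n) case analysis on the
-- total sum and single elements (measured faster; asymptotic change).

-- ===== PORT A =====
-- itertools.combinations(a, r): tuples in A's iteration order (those containing
-- the head first), ported by hand; exact for lists of ints.
def pyCombinations : List Int → Nat → List (List Int)
  | _, 0 => [[]]
  | [], _ + 1 => []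
  | y :: ys, r + 1 => (pyCombinations ys r).map (fun t => y :: t) ++ pyCombinations ys (r + 1)

def div_Subsets (a : List Int) (x : Int) : Int :=
  let subsets := (List.range (a.length + 1)).flatMap (fun r => pyCombinations a r)
  let ans := subsets.foldl
    (fun ans e =>
      if PySem.Int.mod e.sum x ≠ 0 then
        (if (e.length : Int) > ans then (e.length : Int) else ans)
      else ans) 0
  if ans = 0 then -1 else ans

-- ===== PORT B =====
def div_Subsets_alt (a : List Int) (x : Int) : Int :=
  if PySem.Int.mod a.sum x ≠ 0 then (a.length : Int)
  else if a.any (fun e => decide (PySem.Int.mod e x ≠ 0)) then (a.length : Int) - 1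
  else -1

-- ===== PRECONDITION & SPEC =====
-- x = 0 makes '% x' raise ZeroDivisionError in Python A (and in B).
def Pre_div_Subsets (a : List Int) (x : Int) : Prop := x ≠ 0
instance (a : List Int) (x : Int) : Decidable (Pre_div_Subsets a x) := by unfold Pre_div_Subsets; infer_instance
def pvWitness_div_Subsets : List Int × Int := ([1, 2], 2)

def Spec_div_Subsets (a : List Int) (x : Int) (out : Int) : Prop := out = div_Subsets_alt a x
instance (a : List Int) (x : Int) (out : Int) : Decidable (Spec_div_Subsets a x out) := by unfold Spec_div_Subsets; infer_instance

-- ===== CLAIM (what is proved, stated in full; the proofs are below) =====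
def Claim_equal_div_Subsets : Prop := ∀ (a : List Int) (x : Int), Dom_div_Subsets a x → Pre_div_Subsets a x → Spec_div_Subsets a x (div_Subsets a x)

-- ===== LEMMAS AND PROOFS =====

-- every member of pyCombinations a r is a sublist of a of length r
lemma pyCombinations_sublist {a e : List Int} {r : Nat}
    (h : e ∈ pyCombinations a r) : e.Sublist a ∧ e.length = r := by
  induction a generalizing e r with
  | nil =>
    cases r with
    | zero => simp [pyCombinations] at h; simp [h]
    | succ r => simp [pyCombinations] at h
  | cons y ys ih =>
    cases r with
    | zero =>
      simp [pyCombinations] at h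
      simp [h]
    | succ r =>
      simp only [pyCombinations, List.mem_append, List.mem_map] at h
      rcases h with ⟨t, ht, rfl⟩ | h
      · obtain ⟨hs, hl⟩ := ih ht
        exact ⟨List.Sublist.cons₂ y hs, by simp [hl]⟩
      · obtain ⟨hs, hl⟩ := ih h
        exact ⟨hs.cons y, hl⟩

-- every sublist occurs among the combinations of its length
lemma mem_pyCombinations_of_sublist {a e : List Int}
    (h : e.Sublist a) : e ∈ pyCombinations a e.length := by
  induction h with
  | slnil => simp [pyCombinations]
  | @cons l₁ l₂ y _hs ih =>
    cases hl : l₁.length with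
    | zero =>
      have : l₁ = [] := List.length_eq_zero_iff.mp hl
      simp [this, pyCombinations]
    | succ r =>
      rw [hl] at ih
      simp only [pyCombinations, List.mem_append]
      exact Or.inr ih
  | @cons₂ l₁ l₂ y _hs ih =>
    simp only [List.length_cons, pyCombinations, List.mem_append, List.mem_map]
    exact Or.inl ⟨l₁, ih, rfl⟩

-- membership in the flattened list A iterates over
lemma mem_subsets_iff {a e : List Int} :
    e ∈ (List.range (a.length + 1)).flatMap (fun r => pyCombinations a r) ↔ e.Sublist a := by
  constructor
  · intro h
    simp only [List.mem_flatMap, List.mem_range] at h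
    obtain ⟨r, _, hm⟩ := h
    exact (pyCombinations_sublist hm).1
  · intro h
    simp only [List.mem_flatMap, List.mem_range]
    exact ⟨e.length, by have := h.length_le; omega, mem_pyCombinations_of_sublist h⟩

-- the fold's step never decreases the accumulator
lemma foldl_le_self (x c : Int) (L : List (List Int)) :
    c ≤ L.foldl
      (fun ans e =>
        if PySem.Int.mod e.sum x ≠ 0 then
          (if (e.length : Int) > ans then (e.length : Int) else ans)
        else ans) c := by
  induction L generalizing c with
  | nil => simp
  | cons e L ih =>
    refine le_trans ?_ (ih _)
    dsimp only
    split_ifs <;> omega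

-- any qualifying subset bounds the fold from below
lemma foldl_ge_mem (x c : Int) (L : List (List Int)) {e : List Int}
    (he : e ∈ L) (hP : PySem.Int.mod e.sum x ≠ 0) :
    (e.length : Int) ≤ L.foldl
      (fun ans e =>
        if PySem.Int.mod e.sum x ≠ 0 then
          (if (e.length : Int) > ans then (e.length : Int) else ans)
        else ans) c := by
  induction L generalizing c with
  | nil => simp at he
  | cons f L ih =>
    rcases List.mem_cons.mp he with rfl | hm
    · refine le_trans ?_ (foldl_le_self x _ L)
      dsimp only
      rw [if_pos hP]
      split_ifs <;> omega
    · exact ih _ hm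

-- the fold is bounded above by any bound on qualifying subsets
lemma foldl_le_bound (x c B : Int) (L : List (List Int)) (hc : c ≤ B)
    (h : ∀ e ∈ L, PySem.Int.mod e.sum x ≠ 0 → (e.length : Int) ≤ B) :
    L.foldl
      (fun ans e =>
        if PySem.Int.mod e.sum x ≠ 0 then
          (if (e.length : Int) > ans then (e.length : Int) else ans)
        else ans) c ≤ B := by
  induction L generalizing c with
  | nil => simpa
  | cons f L ih =>
    refine ih _ ?_ (fun e he hP => h e (List.mem_cons_of_mem _ he) hP)
    dsimp only
    split_ifs with h1 h2
    · exact h f List.mem_cons_self h1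
    · exact hc
    · exact hc

-- if no subset qualifies, the fold returns its start value
lemma foldl_eq_self (x c : Int) (L : List (List Int))
    (h : ∀ e ∈ L, PySem.Int.mod e.sum x = 0) :
    L.foldl
      (fun ans e =>
        if PySem.Int.mod e.sum x ≠ 0 then
          (if (e.length : Int) > ans then (e.length : Int) else ans)
        else ans) c = c := by
  induction L generalizing c with
  | nil => simp
  | cons f L ih =>
    have hf := h f List.mem_cons_self
    simp only [List.foldl_cons]
    rw [if_neg (by simp [hf])]
    exact ih _ (fun e he => h e (List.mem_cons_of_mem _ he))

-- a sublist of a list of multiples of x sums to a multiple of x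
lemma sublist_sum_dvd {x : Int} {a e : List Int}
    (h : e.Sublist a) (hall : ∀ c ∈ a, x ∣ c) : x ∣ e.sum := by
  induction h with
  | slnil => simp
  | @cons l₁ l₂ y _hs ih =>
    exact ih (fun c hc => hall c (List.mem_cons_of_mem _ hc))
  | @cons₂ l₁ l₂ y _hs ih =>
    simp only [List.sum_cons]
    exact dvd_add (hall y List.mem_cons_self)
      (ih (fun c hc => hall c (List.mem_cons_of_mem _ hc)))

-- ===== VERDICT (by name: the statement is the Claim_ definition above) =====
theorem div_Subsets_spec : Claim_equal_div_Subsets := by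
  intro a x _ hx
  unfold Spec_div_Subsets div_Subsets div_Subsets_alt
  dsimp only
  set L := (List.range (a.length + 1)).flatMap (fun r => pyCombinations a r) with hL
  by_cases hs : PySem.Int.mod a.sum x ≠ 0
  · -- total sum indivisible: answer = n
    rw [if_pos hs]
    have hn0 : a ≠ [] := by
      rintro rfl
      exact hs (by simp [PySem.Int.mod_eq_zero_iff_dvd])
    have hge := foldl_ge_mem x 0 L (mem_subsets_iff.mpr (List.Sublist.refl a)) hs
    have hle := foldl_le_bound x 0 ((a.length : Int)) L (by positivity)
      (fun e he _ => by exact_mod_cast (mem_subsets_iff.mp he).length_le)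
    have hans := le_antisymm hle hge
    rw [hans, if_neg (by
      have hn : a.length ≠ 0 := fun h => hn0 (List.length_eq_zero_iff.mp h)
      exact_mod_cast hn)]
  · -- total sum divisible
    rw [if_neg hs]
    push_neg at hs
    have hdvd : x ∣ a.sum := (PySem.Int.mod_eq_zero_iff_dvd _ _).mp hs
    by_cases hany : ∃ c ∈ a, ¬ x ∣ c
    · -- some element indivisible: answer = n - 1
      have hb : a.any (fun e => decide (PySem.Int.mod e x ≠ 0)) = true := by
        obtain ⟨c, hc, hcd⟩ := hany
        simp only [List.any_eq_true]
        exact ⟨c, hc, by simp [Ne, PySem.Int.mod_eq_zero_iff_dvd, hcd]⟩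
      rw [if_pos hb]
      obtain ⟨c, hc, hcd⟩ := hany
      obtain ⟨l₁, l₂, rfl⟩ := List.append_of_mem hc
      -- n ≥ 2: if the list were the singleton [c], x ∣ sum = c contradicts hcd
      have hn2 : 2 ≤ (l₁ ++ c :: l₂).length := by
        rcases l₁ with _ | ⟨u, l₁⟩
        · rcases l₂ with _ | ⟨v, l₂⟩
          · exact absurd (by simpa using hdvd) hcd
          · simp only [List.nil_append, List.length_cons]; omega
        · simp only [List.length_append, List.length_cons]; omega
      -- the list with c removed is a qualifying sublist of length n - 1
      have hsub : (l₁ ++ l₂).Sublist (l₁ ++ c :: l₂) :=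
        List.Sublist.append (List.Sublist.refl l₁) (List.sublist_cons_self c l₂)
      have hPsub : PySem.Int.mod (l₁ ++ l₂).sum x ≠ 0 := by
        rw [Ne, PySem.Int.mod_eq_zero_iff_dvd]
        intro hd
        apply hcd
        have hc' : c = (l₁ ++ c :: l₂).sum - (l₁ ++ l₂).sum := by
          simp only [List.sum_append, List.sum_cons]; ring
        rw [hc']
        exact dvd_sub hdvd hd
      have hge := foldl_ge_mem x 0 L (mem_subsets_iff.mpr hsub) hPsub
      have hlen : (l₁ ++ c :: l₂).length = (l₁ ++ l₂).length + 1 := by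
        simp only [List.length_append, List.length_cons]; omega
      have hle := foldl_le_bound x 0 (((l₁ ++ c :: l₂).length : Int) - 1) L (by omega)
        (fun e he hP => by
          have hesub := mem_subsets_iff.mp he
          have hne : e.length ≠ (l₁ ++ c :: l₂).length := by
            intro hEq
            have : e = l₁ ++ c :: l₂ := hesub.eq_of_length hEq
            subst this
            exact hP hs
          have := hesub.length_le
          omega)
      have hans := le_antisymm hle (by omega :
        ((l₁ ++ c :: l₂).length : Int) - 1 ≤ _)
      rw [hans, if_neg (by omega)]
    · -- every element divisible: no subset qualifies, answer = -1
      push_neg at hany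
      have hb : a.any (fun e => decide (PySem.Int.mod e x ≠ 0)) = false := by
        simp only [List.any_eq_false]
        intro c hc
        simp [Ne, PySem.Int.mod_eq_zero_iff_dvd, hany c hc]
      rw [hb]
      have hz := foldl_eq_self x 0 L (fun e he => by
        rw [PySem.Int.mod_eq_zero_iff_dvd]
        exact sublist_sum_dvd (mem_subsets_iff.mp he) hany)
      rw [hz]
      simp
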